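-- pv_equiv track=rewrite | github.com/skulluglify/cabbage | cabbage/sodium/motext/pipe_text.py | pipe_text_safe_name_kv
-- ===== SOURCE A (Python) =====
-- from typing import Iterable, Iterator
--
-- def pipe_text_safe_name(codepoints: Iterable[int], extensible: bool = False) -> Iterator[int]:
--     """
--         Skipping Another Symbol Except ASCII.
--     :param codepoints:
--     :param extensible:
--     :return:
--     """
--
--     for codepoint in codepoints:
--
--         if extensible:  # like file.
--
--             # dots.
--             if codepoint in (44, 46):  # ",", "."
--                 yield 46
--
--             # spaces.
--             if codepoint in (32, 43, 45, 95):  # " ", "+", "-", "_"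
--                 if codepoint not in (43,):  # except char "+"
--                     yield codepoint
--                     continue
--
--                 yield 32  # prevent char "+" to " "
--
--         else:
--             # spaces.
--             if codepoint in (32, 43, 45, 95):  # " ", "+", "-", "_"
--                 yield 32
--
--         # nums.
--         if 48 <= codepoint <= 57:
--             yield codepoint
--
--         # upper cases.
--         if 65 <= codepoint <= 90:
--             yield codepoint
--
--         # lower cases.
--         if 97 <= codepoint <= 122:
--             yield codepoint
--
-- def pipe_text_to_lower(codepoints: Iterable[int]) -> Iterator[int]:
--     """
--         To Lower case.
--     :param codepoints:
--     :return:
--     """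
--
--     for codepoint in codepoints:
--         if 65 <= codepoint <= 90:  # to lower case.
--             yield codepoint + 32
--             continue
--
--         yield codepoint
--
-- def pipe_text_safe_name_kv(codepoints: Iterable[int], snippet: bool = False) -> Iterator[int]:
--     """
--         Skipping Another Symbol Except ASCII.
--     :param codepoints:
--     :param snippet:
--     :return:
--     """
--
--     start = 0
--     for codepoint in pipe_text_to_lower(pipe_text_safe_name(codepoints, extensible=False)):
--         if codepoint == 32:  # prevent 'space' to '_'
--             yield 95  # '_'
--             continue
--
--         if snippet:  # auto snippet.
--             if start == 0:
--                 if 48 <= codepoint <= 57:  # key start with nums.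
--                     yield 36  # snippet char '$' before return nums.
--
--                 start = 1  # continuously.
--         yield codepoint
-- ===== SOURCE B (Python) =====
-- def pipe_text_safe_name_kv(codepoints, snippet=False):
--     # One fused pass replacing the three chained generators.
--     start = 0
--     for c in codepoints:
--         if c in (32, 43, 45, 95):
--             yield 95
--             continue
--         if 48 <= c <= 57:
--             d = c
--         elif 65 <= c <= 90:
--             d = c + 32
--         elif 97 <= c <= 122:
--             d = c
--         else:
--             continue
--         if snippet and start == 0:
--             if 48 <= d <= 57:
--                 yield 36
--             start = 1
--         yield d
-- ===== Notes on version B (the rewrite author's own statement) =====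
-- stated objective: simpler
-- what changed: B fuses A's three chained generators (safe-name filter, to-lower map, space/snippet pass) into one loop that classifies each codepoint once and emits directly.
import Mathlib
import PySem

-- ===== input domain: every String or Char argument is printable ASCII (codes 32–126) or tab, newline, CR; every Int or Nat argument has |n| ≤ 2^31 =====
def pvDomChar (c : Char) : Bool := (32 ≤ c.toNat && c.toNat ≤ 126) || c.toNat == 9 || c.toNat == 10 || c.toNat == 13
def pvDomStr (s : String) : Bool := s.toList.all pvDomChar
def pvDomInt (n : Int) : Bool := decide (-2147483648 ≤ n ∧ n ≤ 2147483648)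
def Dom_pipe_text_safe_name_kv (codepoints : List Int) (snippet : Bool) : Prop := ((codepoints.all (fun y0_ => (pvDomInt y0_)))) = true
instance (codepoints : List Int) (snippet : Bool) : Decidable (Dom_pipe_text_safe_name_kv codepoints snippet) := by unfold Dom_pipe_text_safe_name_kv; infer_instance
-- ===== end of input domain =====

-- B fuses A's three chained generators into one loop classifying each codepoint once; objective: simpler.

-- ===== PORT A =====
-- per-element emissions of pipe_text_safe_name (the trailing nums/upper/lower checks)
def pvNameRest (c : Int) : List Int :=
  (if 48 ≤ c ∧ c ≤ 57 then [c] else []) ++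
  (if 65 ≤ c ∧ c ≤ 90 then [c] else []) ++
  (if 97 ≤ c ∧ c ≤ 122 then [c] else [])

-- body of pipe_text_safe_name's loop for one codepoint
def pvNameStep (extensible : Bool) (c : Int) : List Int :=
  if extensible then
    (if c = 44 ∨ c = 46 then [46] else []) ++
    (if c = 32 ∨ c = 43 ∨ c = 45 ∨ c = 95 then
       (if ¬ (c = 43) then [c]           -- yield codepoint; continue
        else [32] ++ pvNameRest c)       -- yield 32, fall through
     else pvNameRest c)
  else
    (if c = 32 ∨ c = 43 ∨ c = 45 ∨ c = 95 then [32] else []) ++ pvNameRest c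

def pipe_text_safe_name (codepoints : List Int) (extensible : Bool) : List Int :=
  codepoints.flatMap (pvNameStep extensible)

def pipe_text_to_lower (codepoints : List Int) : List Int :=
  codepoints.map (fun c => if 65 ≤ c ∧ c ≤ 90 then c + 32 else c)

-- the kv loop with its `start` state
def pvKvLoop (snippet : Bool) (cs : List Int) (start : Int) : List Int :=
  match cs with
  | [] => []
  | c :: rest =>
    if c = 32 then 95 :: pvKvLoop snippet rest start
    else if snippet then
      (if start = 0 then
        (if 48 ≤ c ∧ c ≤ 57 then [36] else []) ++ (c :: pvKvLoop snippet rest 1)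
       else c :: pvKvLoop snippet rest start)
    else c :: pvKvLoop snippet rest start

def pipe_text_safe_name_kv (codepoints : List Int) (snippet : Bool) : List Int :=
  pvKvLoop snippet (pipe_text_to_lower (pipe_text_safe_name codepoints false)) 0

-- ===== PORT B =====
def pvAltLoop (snippet : Bool) (cs : List Int) (start : Int) : List Int :=
  match cs with
  | [] => []
  | c :: rest =>
    if c = 32 ∨ c = 43 ∨ c = 45 ∨ c = 95 then 95 :: pvAltLoop snippet rest start
    else
      match (if 48 ≤ c ∧ c ≤ 57 then some c
             else if 65 ≤ c ∧ c ≤ 90 then some (c + 32)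
             else if 97 ≤ c ∧ c ≤ 122 then some c
             else none) with
      | none => pvAltLoop snippet rest start
      | some d =>
        if snippet ∧ start = 0 then
          (if 48 ≤ d ∧ d ≤ 57 then [36] else []) ++ (d :: pvAltLoop snippet rest 1)
        else d :: pvAltLoop snippet rest start

def pipe_text_safe_name_kv_alt (codepoints : List Int) (snippet : Bool) : List Int :=
  pvAltLoop snippet codepoints 0

-- ===== PRECONDITION & SPEC =====
def Spec_pipe_text_safe_name_kv (codepoints : List Int) (snippet : Bool) (out : List Int) : Prop := out = pipe_text_safe_name_kv_alt codepoints snippet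
instance (codepoints : List Int) (snippet : Bool) (out : List Int) : Decidable (Spec_pipe_text_safe_name_kv codepoints snippet out) := by unfold Spec_pipe_text_safe_name_kv; infer_instance

-- ===== CLAIM (what is proved, stated in full; the proofs are below) =====
def Claim_equal_pipe_text_safe_name_kv : Prop := ∀ (codepoints : List Int) (snippet : Bool), Dom_pipe_text_safe_name_kv codepoints snippet → Spec_pipe_text_safe_name_kv codepoints snippet (pipe_text_safe_name_kv codepoints snippet)

-- ===== LEMMAS AND PROOFS =====
-- main invariant: the fused loop equals A's pipeline, for every start value
lemma pvLoop_eq (snippet : Bool) (cs : List Int) (start : Int) :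
    pvKvLoop snippet (pipe_text_to_lower (pipe_text_safe_name cs false)) start =
      pvAltLoop snippet cs start := by
  induction cs generalizing start with
  | nil => rfl
  | cons c rest ih =>
    by_cases hsp : c = 32 ∨ c = 43 ∨ c = 45 ∨ c = 95
    · have h1 : ¬ (48 ≤ c ∧ c ≤ 57) := by omega
      have h2 : ¬ (65 ≤ c ∧ c ≤ 90) := by omega
      have h3 : ¬ (97 ≤ c ∧ c ≤ 122) := by omega
      simp [pipe_text_safe_name, pipe_text_to_lower, pvNameStep, pvNameRest,
            hsp, h1, h2, h3, pvKvLoop, pvAltLoop, ← ih]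
    · push Not at hsp
      obtain ⟨h32, h43, h45, h95⟩ := hsp
      by_cases hd : 48 ≤ c ∧ c ≤ 57
      · have h2 : ¬ (65 ≤ c ∧ c ≤ 90) := by omega
        have h3 : ¬ (97 ≤ c ∧ c ≤ 122) := by omega
        simp [pipe_text_safe_name, pipe_text_to_lower, pvNameStep, pvNameRest,
              h32, h43, h45, h95, hd, h2, h3, pvKvLoop, pvAltLoop, ← ih]
        by_cases hs : snippet
        · by_cases h0 : start = 0 <;> simp [hs, h0]
        · simp [hs]
      · by_cases hu : 65 ≤ c ∧ c ≤ 90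
        · have h3 : ¬ (97 ≤ c ∧ c ≤ 122) := by omega
          have hne : ¬ c + 32 = 32 := by omega
          have hnd : ¬ (48 ≤ c + 32 ∧ c + 32 ≤ 57) := by omega
          simp [pipe_text_safe_name, pipe_text_to_lower, pvNameStep, pvNameRest,
                h32, h43, h45, h95, hd, hu, h3, hne, hnd, pvKvLoop, pvAltLoop, ← ih]
          by_cases hs : snippet
          · by_cases h0 : start = 0 <;> simp [hs, h0]
          · simp [hs]
        · by_cases hl : 97 ≤ c ∧ c ≤ 122
          · simp [pipe_text_safe_name, pipe_text_to_lower, pvNameStep, pvNameRest,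
                  h32, h43, h45, h95, hd, hu, hl, pvKvLoop, pvAltLoop, ← ih]
            by_cases hs : snippet
            · by_cases h0 : start = 0 <;> simp [hs, h0]
            · simp [hs]
          · simp [pipe_text_safe_name, pipe_text_to_lower, pvNameStep, pvNameRest,
                  h32, h43, h45, h95, hd, hu, hl, pvAltLoop]
            exact ih start

-- ===== VERDICT (by name: the statement is the Claim_ definition above) =====
theorem pipe_text_safe_name_kv_spec : Claim_equal_pipe_text_safe_name_kv := by
  intro codepoints snippet _
  unfold Spec_pipe_text_safe_name_kv pipe_text_safe_name_kv pipe_text_safe_name_kv_alt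
  exact pvLoop_eq snippet codepoints 0
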